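/-
  THE CONTRACTS OF gifalloc.c AND openbsd-reallocarray.c (design/CONTRACTS.md, last table: "the contracts dgif_lib.c NEEDS";
  design/HEADER-CHECKLIST.confirmed.md X1-X6: what the sources really do). Vocabulary: Gif/Spec/Common.lean (+ CommonMore.lean §8);
  the heap's contracts: ProgX/Base/Spec/Heap.lean (`malloc.spec`, `calloc.spec`, `free.spec`, `realloc.spec`).

  TWO KINDS OF CONTRACT.
  HEAP-LEVEL (`openbsd_reallocarray`, `GifBitSize`, `GifMakeMapObject`, `GifFreeMapObject`, `GifFreeExtensions`): the function knows
  nothing of the decoder's forest. Pre: `HeapPre H rest frames u` and what it needs of its arguments. Post: the heap's invariant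
  for the NEW heap — stated exactly (`H.release …`) when it frees, as `H.Grew H'` when it allocates — and a footprint a client can
  carry its own invariant through: every window lies at or above the old bump pointer, or is a gap of the heap, or is named.
  FOREST-LEVEL (`GifAddExtensionBlock`, `GifFreeSavedImages`: called with pointers INTO gif): pre `Env`, post `Back2` for a new heap
  and a new forest; the footprint is the whole heap's region and its shadow (the post says everything a caller may use afterwards).

  FRAMES (design/FRAMES.gif.txt):
      function               own                      callees (frame)                                          frame
      openbsd_reallocarray   sub 8                    realloc (128)                                     8 + 8 + 128 = 144
      GifBitSize             —                        —                                                           0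
      GifMakeMapObject       6 pushes + sub 8 = 56    GifBitSize (0), malloc (32), calloc (96), memcpy (80), free (24)   56 + 8 + 96 = 160
      GifFreeMapObject       1 push = 8               free (24), a check (16)                           8 + 8 + 24 = 40 → 48 (table)
      GifAddExtensionBlock   6 pushes + sub 8 = 56    openbsd_reallocarray (144), malloc (32), memcpy (80)       56 + 8 + 144 = 208
      GifFreeExtensions      4 pushes + sub 8 = 40    free (24), checks (16)                           40 + 8 + 24 = 72 → 80 (table)
      GifFreeSavedImages     3 pushes = 24            GifFreeExtensions (80), GifFreeMapObject (48), free (24)    24 + 8 + 80 = 112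
-/
import Gif.Spec.CommonMore
import Gif.Spec.Reader
namespace Gif.Spec
open X86 X86.User Asan ProgX.Base ProgX.Base.Spec

/-! ### `openbsd_reallocarray`, `GifBitSize` -/

/-- **`openbsd_reallocarray(rdi = optr, rsi = nmemb, rdx = size)`** (openbsd-reallocarray.c:19-67): the overflow test, the test
`size == 0 || nmemb == 0`, then `realloc(optr, size * nmemb)`. Pre: both factors are at least 1 and below 2^32 — true at the
four call sites (dgif_lib.c l.445: `ImageCount + 1`, 56; l.1174: `ImageCount ≥ 1`, 56; l.1222: `ImageSize ≥ 1`, 1; gifalloc.c l.239: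
`count + 1`, 24) — so neither early return is taken (the overflow arm would store `errno`; it is dead) and the product is exact.
`optr` is NULL or the live object `(optr, n)` of capacity `c`. Post: `realloc`'s, for `m = nmemb · size` (ProgX/Spec/Heap.lean:
`AllocPost` for NULL, `ReallocPost` — in place, moved, failed — otherwise). -/
def openbsd_reallocarray.spec (H : Heap) (rest : List Obj) (frames : List (Nat × FrameLayout)) (n c : Nat) : Spec where
  pre u :=
    HeapPre H rest frames u ∧
    1 ≤ (u.reg .rsi).toNat ∧ (u.reg .rsi).toNat < 2 ^ 32 ∧
    1 ≤ (u.reg .rdx).toNat ∧ (u.reg .rdx).toNat < 2 ^ 32 ∧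
    ((u.reg .rdi).toNat = 0 ∨ H.LiveCap (u.reg .rdi).toNat n c)
  post u v :=
    ((u.reg .rdi).toNat = 0 →
      AllocPost H rest frames 144 ((u.reg .rsi).toNat * (u.reg .rdx).toNat) (r16 ((u.reg .rsi).toNat * (u.reg .rdx).toNat)) u v) ∧
    ((u.reg .rdi).toNat ≠ 0 →
      ReallocPost H rest frames 144 (u.reg .rdi).toNat n c ((u.reg .rsi).toNat * (u.reg .rdx).toNat) u v)
  frame := 144
  writes u :=
    [⟨0x800000, 0x800008⟩,
     ⟨H.next - 32, H.next - 8⟩,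
     shadowSpan H.next (H.next + (u.reg .rsi).toNat * (u.reg .rdx).toNat),
     ⟨H.next, H.next + (u.reg .rsi).toNat * (u.reg .rdx).toNat⟩,
     ⟨(u.reg .rdi).toNat - 32, (u.reg .rdi).toNat - 16⟩,
     shadowSpan (u.reg .rdi).toNat ((u.reg .rdi).toNat + c)]

@[vspec] theorem openbsd_reallocarray.spec_frame (H : Heap) (rest : List Obj) (frames : List (Nat × FrameLayout)) (n c : Nat) :
    (openbsd_reallocarray.spec H rest frames n c).frame = 144 := id rfl

@[vspec] theorem openbsd_reallocarray.spec_writes (H : Heap) (rest : List Obj) (frames : List (Nat × FrameLayout)) (n c : Nat)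
    (u : State) :
    (openbsd_reallocarray.spec H rest frames n c).writes u =
      [⟨0x800000, 0x800008⟩,
       ⟨H.next - 32, H.next - 8⟩,
       shadowSpan H.next (H.next + (u.reg .rsi).toNat * (u.reg .rdx).toNat),
       ⟨H.next, H.next + (u.reg .rsi).toNat * (u.reg .rdx).toNat⟩,
       ⟨(u.reg .rdi).toNat - 32, (u.reg .rdi).toNat - 16⟩,
       shadowSpan (u.reg .rdi).toNat ((u.reg .rdi).toNat + c)] := id rfl

/-- **`GifBitSize(edi = n)`** (gifalloc.c:23-32): the smallest `i` in 1 … 8 with `2^i ≥ n`, or 9. A leaf without a frame and without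
a memory access. All a caller needs: the result is between 1 and 9 (so `1 << result` is between 2 and 512). -/
def GifBitSize.spec : Spec where
  pre _ := True
  post u v :=
    v.mem = u.mem ∧ 1 ≤ (v.reg .rax).toNat ∧ (v.reg .rax).toNat ≤ 9
  frame := 0
  writes _ := []

@[vspec] theorem GifBitSize.spec_frame : GifBitSize.spec.frame = 0 := id rfl
@[vspec] theorem GifBitSize.spec_writes (u : State) : GifBitSize.spec.writes u = [] := id rfl

/-! ### Colour maps -/

/-- **What `GifMakeMapObject(count, src)` leaves behind.** The heap `H'` is `H` after its allocations (`H.Grew H'`); NULL (the count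
is no power of two, or an allocation failed: then the first object, if it was allocated, is freed again: no leak, X1), or a map:
the `ColorMapObject` `rax` and its `Colors` array `colors` are two LIVE objects of `H'` at or above the old bump pointer — so no
object a caller owns has their bases — with `ColorCount = count`, `Colors = colors`, `2 ≤ count ≤ 256`. (`BitsPerPixel`, `SortFlag`
and the colours are stored too: no clause needs their values.) -/
def MakeMapPost (H : Heap) (rest : List Obj) (frames : List (Nat × FrameLayout)) (count : Nat) (u v : State) : Prop :=
  ∃ H', H.Grew H' ∧
    HeapInv H' rest frames ((u.reg .rsp).toNat + 8) v.mem ∧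
    ((v.reg .rax).toNat = 0 ∨
      ∃ colors,
        H'.Live (v.reg .rax).toNat 24 ∧ H'.Live colors (3 * count) ∧
        H.next ≤ (v.reg .rax).toNat ∧ H.next ≤ colors ∧ colors ≠ (v.reg .rax).toNat ∧
        ColorMapObject.ColorCount v.mem (v.reg .rax).toNat = count ∧
        ColorMapObject.Colors v.mem (v.reg .rax).toNat = colors ∧
        2 ≤ count ∧ count ≤ 256)

/-- **`GifMakeMapObject(edi = ColorCount, rsi = ColorMap)`** (gifalloc.c:42-74): `malloc(24)`, `calloc(ColorCount, 3)`, the three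
scalar fields, and `memcpy(Colors, ColorMap, 3 · ColorCount)` if `ColorMap` is not NULL (it COPIES: the caller keeps `ColorMap`).
Pre: the count (as an `int`) is at most 256 — `1 << BitsPerPixel` with `BitsPerPixel ≤ 8` at l.280 / 396, the count of a valid map
at l.464 —; `ColorMap` is NULL or `3 · count` bytes inside one live object. Footprint: the control cell, everything at or above
the old bump pointer's header (`H.next − 32`), and its shadow: NOTHING a caller owns. -/
def GifMakeMapObject.spec (H : Heap) (rest : List Obj) (frames : List (Nat × FrameLayout)) (count : Nat) : Spec where
  pre u :=
    HeapPre H rest frames u ∧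
    (u.reg .rdi).toNat % 2 ^ 32 = count ∧ count ≤ 256 ∧
    ((u.reg .rsi).toNat = 0 ∨ LiveIn (H.liveObjs ++ rest) frames (u.reg .rsi).toNat (3 * count))
  post u v :=
    MakeMapPost H rest frames count u v
  frame := 160
  writes _ :=
    [⟨0x800000, 0x800008⟩,
     ⟨H.next - 32, 0xC00000⟩,
     shadowSpan (H.next - 32) 0xC00000]

@[vspec] theorem GifMakeMapObject.spec_frame (H : Heap) (rest : List Obj) (frames : List (Nat × FrameLayout)) (count : Nat) :
    (GifMakeMapObject.spec H rest frames count).frame = 160 := id rfl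

@[vspec] theorem GifMakeMapObject.spec_writes (H : Heap) (rest : List Obj) (frames : List (Nat × FrameLayout)) (count : Nat)
    (u : State) :
    (GifMakeMapObject.spec H rest frames count).writes u =
      [⟨0x800000, 0x800008⟩,
       ⟨H.next - 32, 0xC00000⟩,
       shadowSpan (H.next - 32) 0xC00000] := id rfl

/-- **`GifFreeMapObject(rdi = Object)`** (gifalloc.c:79-84): `if (Object != NULL) { free(Object->Colors); free(Object); }`. NULL is
accepted (design F-1: l.268 ALWAYS passes NULL, l.380 for the first image) and does nothing. Otherwise `Object` is the live
24-byte object whose `Colors` field holds `colors`, the live object `(colors, n)`, another object. Post: both are freed, every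
other object is as it was. Footprint: the state words of the two headers, the shadow of the two objects, 48 bytes of stack. -/
def GifFreeMapObject.spec (H : Heap) (rest : List Obj) (frames : List (Nat × FrameLayout)) (colors n : Nat) : Spec where
  pre u :=
    HeapPre H rest frames u ∧
    ((u.reg .rdi).toNat = 0 ∨
      (H.Live (u.reg .rdi).toNat 24 ∧ H.Live colors n ∧ colors ≠ (u.reg .rdi).toNat ∧
       ColorMapObject.Colors u.mem (u.reg .rdi).toNat = colors))
  post u v :=
    ((u.reg .rdi).toNat = 0 →
      HeapInv H rest frames ((u.reg .rsp).toNat + 8) v.mem ∧ ShadowUntouched u.mem v.mem ∧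
      Mem.SameExcept [⟨(u.reg .rsp).toNat - 48, (u.reg .rsp).toNat⟩] u.mem v.mem) ∧
    ((u.reg .rdi).toNat ≠ 0 →
      HeapInv ((H.release colors).release (u.reg .rdi).toNat) rest frames ((u.reg .rsp).toNat + 8) v.mem)
  frame := 48
  writes u :=
    [⟨colors - 24, colors - 16⟩,
     shadowSpan colors (colors + n),
     ⟨(u.reg .rdi).toNat - 24, (u.reg .rdi).toNat - 16⟩,
     shadowSpan (u.reg .rdi).toNat ((u.reg .rdi).toNat + 24)]

@[vspec] theorem GifFreeMapObject.spec_frame (H : Heap) (rest : List Obj) (frames : List (Nat × FrameLayout)) (colors n : Nat) :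
    (GifFreeMapObject.spec H rest frames colors n).frame = 48 := id rfl

@[vspec] theorem GifFreeMapObject.spec_writes (H : Heap) (rest : List Obj) (frames : List (Nat × FrameLayout)) (colors n : Nat)
    (u : State) :
    (GifFreeMapObject.spec H rest frames colors n).writes u =
      [⟨colors - 24, colors - 16⟩,
       shadowSpan colors (colors + n),
       ⟨(u.reg .rdi).toNat - 24, (u.reg .rdi).toNat - 16⟩,
       shadowSpan (u.reg .rdi).toNat ((u.reg .rdi).toNat + 24)] := id rfl

/-! ### Extension lists -/

/-- **`GifAddExtensionBlock(rdi = &gif.ExtensionBlockCount, rsi = &gif.ExtensionBlocks, edx = Function, ecx = Len, r8 = ExtData)`**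
(gifalloc.c:229-265), as DGifSlurp calls it (l.1283, 1299: always on the PENDING list of gif, with `ExtData = &pv.Buf[1]`,
`Len = pv.Buf[0]`, 1 … 255). The first block: `malloc(24)`; otherwise `reallocarray(*Blocks, count + 1, 24)` (on NULL: GIF_ERROR,
`*Blocks` kept: X3); then `count++`, the three fields of the new block, `Bytes = malloc(Len)` (on NULL: GIF_ERROR with a COUNTED
block whose `Bytes` is NULL: design F-2 — the forest's `Blk.bytes = 0`), `memcpy(Bytes, ExtData, Len)`.
Post (`Back2`): A heap, A forest that differs from `F` in `pend` only; BOTH results leave the state invariant (a list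
GifFreeExtensions can free); no input is read. Footprint: the heap's region and its shadow. -/
def GifAddExtensionBlock.spec (H : Heap) (rest : List Obj) (frames : List (Nat × FrameLayout)) (F : Forest) (R : Rd) (len : Nat) :
    Spec where
  pre u :=
    Env H rest frames F R u ∧
    (u.reg .rdi).toNat = F.gif + 80 ∧
    (u.reg .rsi).toNat = F.gif + 88 ∧
    (u.reg .rcx).toNat % 2 ^ 32 = len ∧ 1 ≤ len ∧ len ≤ 255 ∧
    F.pv + 88 ≤ (u.reg .r8).toNat ∧ (u.reg .r8).toNat + len ≤ F.pv + 344
  post u v :=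
    ∃ H' F', Back2 H rest frames R u v H' F' ∧ F.SameButPend F' ∧ IsBool v ∧ rem R v.mem = rem R u.mem
  frame := 208
  writes _ :=
    [⟨0x800000, 0x1000020⟩]

@[vspec] theorem GifAddExtensionBlock.spec_frame (H : Heap) (rest : List Obj) (frames : List (Nat × FrameLayout)) (F : Forest)
    (R : Rd) (len : Nat) : (GifAddExtensionBlock.spec H rest frames F R len).frame = 208 := id rfl

@[vspec] theorem GifAddExtensionBlock.spec_writes (H : Heap) (rest : List Obj) (frames : List (Nat × FrameLayout)) (F : Forest)
    (R : Rd) (len : Nat) (u : State) :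
    (GifAddExtensionBlock.spec H rest frames F R len).writes u =
      [⟨0x800000, 0x1000020⟩] := id rfl

/-- **What `GifFreeExtensions` asks of the pair of cells it is given**: the count cell `[cp, cp + 4)` and the pointer cell
`[bp, bp + 8)` lie inside ONE live heap object `(ob, on)` (gif; or the SavedImages array, for a slot's pair) that is none of the
list's objects, and they hold the list `e` (`ExtsAt`), whose objects are owned. -/
structure ExtCells (H : Heap) (e : Option Exts) (cp bp ob on : Nat) (mem : Mem) : Prop where
  holder : H.Live ob on
  cpIn : ob ≤ cp ∧ cp + 4 ≤ ob + on
  bpIn : ob ≤ bp ∧ bp + 8 ≤ ob + on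
  apartCells : cp + 4 ≤ bp ∨ bp + 8 ≤ cp
  shape : ExtsAt e (rd mem bp 8) (rd mem cp 4) mem
  owns : Owns H ((ob, on) :: Exts.objs e)

/-- **`GifFreeExtensions(rdi = &count, rsi = &blocks)`** (gifalloc.c:267-282): returns at once on the empty list (`*blocks == NULL`);
otherwise `free(ep->Bytes)` for every counted block (NULL for a block whose allocation failed: `free(NULL)` does nothing),
`free(*blocks)`, `*blocks = NULL`, `*count = 0`. Post: the heap is `H` with every object of the list freed; the two cells hold
`(0, 0)` (the empty list: as before); every byte outside the two cells, the headers' state words (gaps of the heap), the shadow and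
72 … 80 bytes of stack is as it was (`same`: the footprint, as a list of windows each of which is one of the cells or a gap of the heap that lies in the heap's region /
the shadow (at or above 800000H) or in the stack BELOW the entry's stack pointer: so it misses the cursor of any caller,
`Ctx.cursor_range`). -/
def GifFreeExtensions.spec (H : Heap) (rest : List Obj) (frames : List (Nat × FrameLayout)) (e : Option Exts)
    (ob on : Nat) : Spec where
  pre u :=
    HeapPre H rest frames u ∧
    ExtCells H e (u.reg .rdi).toNat (u.reg .rsi).toNat ob on u.mem
  post u v :=
    HeapInv (H.releaseAll ((Exts.objs e).map Prod.fst)) rest frames ((u.reg .rsp).toNat + 8) v.mem ∧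
    rd v.mem (u.reg .rsi).toNat 8 = 0 ∧
    rd v.mem (u.reg .rdi).toNat 4 = 0 ∧
    ∃ ws, Mem.SameExcept ws u.mem v.mem ∧
      ∀ w, w ∈ ws →
        (w.lo = (u.reg .rdi).toNat ∧ w.hi = (u.reg .rdi).toNat + 4) ∨
        (w.lo = (u.reg .rsi).toNat ∧ w.hi = (u.reg .rsi).toNat + 8) ∨
        (Gap0 H w ∧ (0x800000 ≤ w.lo ∨ (0x700000 ≤ w.lo ∧ w.hi ≤ (u.reg .rsp).toNat)))
  frame := 80
  writes _ :=
    [⟨0x800000, 0x1000020⟩]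

@[vspec] theorem GifFreeExtensions.spec_frame (H : Heap) (rest : List Obj) (frames : List (Nat × FrameLayout)) (e : Option Exts)
    (ob on : Nat) : (GifFreeExtensions.spec H rest frames e ob on).frame = 80 := id rfl

@[vspec] theorem GifFreeExtensions.spec_writes (H : Heap) (rest : List Obj) (frames : List (Nat × FrameLayout)) (e : Option Exts)
    (ob on : Nat) (u : State) :
    (GifFreeExtensions.spec H rest frames e ob on).writes u =
      [⟨0x800000, 0x1000020⟩] := id rfl

/-! ### The SavedImages array -/

/-- **`GifFreeSavedImages(rdi = gif)`** (gifalloc.c:431-453), as DGifCloseFile calls it (l.701: `gif.SavedImages ≠ NULL`): for every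
COUNTED slot — never one at or behind `ImageCount` (X5) — frees its colour map (if any; nulls the field), its raster (if any; the
field DANGLES), its extension list; then frees the array, also when `ImageCount = 0` (X5: the state after a failed deep copy,
l.467-470), and stores `gif.SavedImages = NULL`.
Pre: `Env` with `F.saved = some s`. Post: the heap is `H` with every object of `Saved.objs F.saved` freed; everything else the
forest owns is live and untouched: `Owns H' F.ownedButSaved`, and the shape holds for `{ F with saved := none }` EXCEPT that
`gif.ImageCount` still holds the old count — so it is stated field by field: the other components' clauses of `Shape`
(`CloseShape`). Footprint: the heap's region and its shadow. -/
structure CloseShape (F : Forest) (R : Rd) (mem : Mem) : Prop where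
  priv : GifFileType.Private mem F.gif = F.pv
  scm : MapAt F.scm (GifFileType.SColorMap mem F.gif) mem
  icm : MapAt F.icm (GifFileType.Image.ColorMap mem F.gif) mem
  saved : GifFileType.SavedImages mem F.gif = 0
  pend : ExtsAt F.pend (GifFileType.ExtensionBlocks mem F.gif) (GifFileType.ExtensionBlockCount mem F.gif) mem
  file : GifFilePrivateType.File mem F.pv = 0
  state : GifFilePrivateType.FileState mem F.pv = 8
  cursor : CursorOK R mem

def GifFreeSavedImages.spec (H : Heap) (rest : List Obj) (frames : List (Nat × FrameLayout)) (F : Forest) (R : Rd) : Spec where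
  pre u :=
    Env H rest frames F R u ∧
    (u.reg .rdi).toNat = F.gif ∧
    F.saved ≠ none
  post u v :=
    HeapInv (H.releaseAll ((Saved.objs F.saved).map Prod.fst)) rest frames ((u.reg .rsp).toNat + 8) v.mem ∧
    CloseShape F R v.mem ∧
    rem R v.mem = rem R u.mem
  frame := 112
  writes _ :=
    [⟨0x800000, 0x1000020⟩]

@[vspec] theorem GifFreeSavedImages.spec_frame (H : Heap) (rest : List Obj) (frames : List (Nat × FrameLayout)) (F : Forest)
    (R : Rd) : (GifFreeSavedImages.spec H rest frames F R).frame = 112 := id rfl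

@[vspec] theorem GifFreeSavedImages.spec_writes (H : Heap) (rest : List Obj) (frames : List (Nat × FrameLayout)) (F : Forest)
    (R : Rd) (u : State) :
    (GifFreeSavedImages.spec H rest frames F R).writes u =
      [⟨0x800000, 0x1000020⟩] := id rfl

end Gif.Spec
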